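-- pv_equiv track=rewrite | github.com/jemtca/CodingBat | Python/List-2/zero_max.py | zero_max
-- ===== SOURCE A (Python) =====
-- def zero_max(nums):
--
--     for x in range(len(nums)):
--         largest_odd = 0
--         if nums[x] == 0:
--             i = x+1
--             while i < len(nums):
--                 if nums[i] % 2 != 0 and largest_odd < nums[i]:
--                     largest_odd = nums[i]
--                 i += 1
--             nums[x] = largest_odd
--
--     return nums
-- ===== SOURCE B (Python) =====
-- def zero_max(nums):
--     m = 0
--     for i in range(len(nums) - 1, -1, -1):
--         v = nums[i]
--         if v == 0:
--             nums[i] = m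
--         elif v % 2 != 0 and v > m:
--             m = v
--     return nums
-- ===== Notes on version B (the rewrite author's own statement) =====
-- stated objective: alternative
-- what changed: Replaces A's per-zero rescan of the suffix by a single right-to-left pass that maintains the running maximum positive odd value seen so far.
import Mathlib
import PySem

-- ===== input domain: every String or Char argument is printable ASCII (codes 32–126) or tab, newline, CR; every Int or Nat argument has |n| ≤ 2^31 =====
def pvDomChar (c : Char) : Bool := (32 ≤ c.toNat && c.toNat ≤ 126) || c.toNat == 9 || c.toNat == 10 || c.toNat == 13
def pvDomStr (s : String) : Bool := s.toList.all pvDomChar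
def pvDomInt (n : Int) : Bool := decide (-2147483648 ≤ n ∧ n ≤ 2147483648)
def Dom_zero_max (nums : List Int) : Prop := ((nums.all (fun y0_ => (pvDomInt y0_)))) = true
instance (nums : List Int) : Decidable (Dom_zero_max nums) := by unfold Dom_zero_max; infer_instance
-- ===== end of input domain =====

-- ===== PORT A =====
-- B: one right-to-left pass tracking the running max positive odd value, instead of A's
-- per-zero rescan of the suffix; the equivalence is about the returned list (both Pythons
-- also mutate the argument list in place identically: each zero replaced).
-- inner while loop of A: scan positions i.. for the largest positive odd value
def zmInner (nums : List Int) (i : Nat) (largest : Int) : Int :=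
  if h : i < nums.length then
    let v := nums[i]
    zmInner nums (i + 1) (if PySem.Int.mod v 2 ≠ 0 ∧ largest < v then v else largest)
  else largest
termination_by nums.length - i

-- outer for loop of A over x = 0 .. len-1, mutating nums in place
def zmOuter (nums : List Int) (x : Nat) : List Int :=
  if h : x < nums.length then
    zmOuter (if nums[x] = 0 then nums.set x (zmInner nums (x + 1) 0) else nums) (x + 1)
  else nums
termination_by nums.length - x
decreasing_by
  split
  · simp only [List.length_set]; omega
  · omega

def zero_max (nums : List Int) : List Int := zmOuter nums 0

-- ===== PORT B =====
-- single right-to-left pass: returns (rewritten suffix, running max positive odd in it)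
def zmB : List Int → List Int × Int
  | [] => ([], 0)
  | v :: rest =>
    let (r, m) := zmB rest
    if v = 0 then (m :: r, m)
    else if PySem.Int.mod v 2 ≠ 0 ∧ m < v then (v :: r, v)
    else (v :: r, m)

def zero_max_alt (nums : List Int) : List Int := (zmB nums).1

-- ===== PRECONDITION & SPEC =====
def Spec_zero_max (nums : List Int) (out : List Int) : Prop := out = zero_max_alt nums
instance (nums : List Int) (out : List Int) : Decidable (Spec_zero_max nums out) := by unfold Spec_zero_max; infer_instance

-- ===== CLAIM (what is proved, stated in full; the proofs are below) =====
def Claim_equal_zero_max : Prop := ∀ (nums : List Int), Dom_zero_max nums → Spec_zero_max nums (zero_max nums)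

-- ===== LEMMAS AND PROOFS =====

-- running max of B is nonnegative
theorem zmB_snd_nonneg (l : List Int) : 0 ≤ (zmB l).2 := by
  induction l with
  | nil => simp [zmB]
  | cons v rest ih =>
    simp only [zmB]
    split_ifs <;> simp_all <;> omega

-- B's recursion, read off on heads
theorem zmB_fst_cons (v : Int) (rest : List Int) :
    (zmB (v :: rest)).1 = (if v = 0 then (zmB rest).2 else v) :: (zmB rest).1 := by
  simp only [zmB]
  split_ifs <;> rfl

theorem zmB_snd_cons (v : Int) (rest : List Int) :
    (zmB (v :: rest)).2 =
      if PySem.Int.mod v 2 ≠ 0 ∧ (zmB rest).2 < v then v else (zmB rest).2 := by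
  simp only [zmB]
  by_cases h0 : v = 0
  · subst h0
    have hne : ¬ (PySem.Int.mod (0:Int) 2 ≠ 0 ∧ (zmB rest).2 < 0) := fun hh =>
      hh.1 (by decide)
    rw [if_neg hne, if_pos rfl, if_neg hne]
  · split_ifs <;> simp_all

-- A's inner scan is a left fold over the suffix
theorem zmInner_eq_foldl (nums : List Int) (i : Nat) (acc : Int) :
    zmInner nums i acc =
      (nums.drop i).foldl
        (fun m v => if PySem.Int.mod v 2 ≠ 0 ∧ m < v then v else m) acc := by
  by_cases h : i < nums.length
  · rw [zmInner, dif_pos h, List.drop_eq_getElem_cons h]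
    simp only [List.foldl_cons]
    exact zmInner_eq_foldl nums (i + 1) _
  · rw [zmInner, dif_neg h, List.drop_eq_nil_of_le (by omega)]
    rfl
termination_by nums.length - i

-- the left fold from a nonnegative start equals max of start and B's running max
theorem foldl_eq_max_zmB (l : List Int) (acc : Int) (hacc : 0 ≤ acc) :
    l.foldl (fun m v => if PySem.Int.mod v 2 ≠ 0 ∧ m < v then v else m) acc =
      if (zmB l).2 ≤ acc then acc else (zmB l).2 := by
  induction l generalizing acc with
  | nil => simp only [List.foldl_nil, zmB]; split_ifs <;> omega
  | cons v rest ih =>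
    simp only [List.foldl_cons]
    rw [zmB_snd_cons]
    by_cases hodd : PySem.Int.mod v 2 ≠ 0
    · by_cases hlt : acc < v
      · rw [if_pos ⟨hodd, hlt⟩, ih v (by omega)]
        split_ifs <;> simp_all <;> omega
      · rw [if_neg (by tauto), ih acc hacc]
        split_ifs <;> simp_all <;> omega
    · have hz : (if PySem.Int.mod v 2 ≠ 0 ∧ (zmB rest).2 < v then v else (zmB rest).2)
          = (zmB rest).2 := if_neg (by tauto)
      rw [hz, if_neg (fun hh => hodd hh.1), ih acc hacc]

-- the inner scan from 0 computes exactly B's running max of the suffix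
theorem zmInner_eq_zmB (nums : List Int) (i : Nat) :
    zmInner nums i 0 = (zmB (nums.drop i)).2 := by
  rw [zmInner_eq_foldl, foldl_eq_max_zmB _ _ le_rfl]
  have := zmB_snd_nonneg (nums.drop i)
  split_ifs <;> omega

-- main invariant: A's outer loop rewrites the suffix exactly as B does
theorem zmOuter_eq (nums : List Int) (x : Nat) :
    zmOuter nums x = nums.take x ++ (zmB (nums.drop x)).1 := by
  by_cases h : x < nums.length
  · rw [zmOuter.eq_def, dif_pos h]
    by_cases h0 : nums[x] = 0
    · rw [if_pos h0, zmOuter_eq (nums.set x (zmInner nums (x + 1) 0)) (x + 1),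
        List.set_eq_take_cons_drop _ h, zmInner_eq_zmB]
      have hlen : (nums.take x).length = x := List.length_take_of_le (by omega)
      have h1 : ∀ a : Int, (List.take x nums ++ a :: List.drop (x + 1) nums).take (x + 1)
          = List.take x nums ++ [a] := by
        intro a
        rw [show x + 1 = (List.take x nums).length + 1 from by omega, List.take_append]
        simp
      have h2 : ∀ a : Int, (List.take x nums ++ a :: List.drop (x + 1) nums).drop (x + 1)
          = List.drop (x + 1) nums := by
        intro a
        rw [show x + 1 = (List.take x nums).length + 1 from by omega, List.drop_append]
        simp
      rw [h1, h2, List.drop_eq_getElem_cons h, zmB_fst_cons, if_pos h0]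
      simp
    · rw [if_neg h0, zmOuter_eq nums (x + 1)]
      have h1 : List.take (x + 1) nums = List.take x nums ++ [nums[x]] := by
        rw [List.take_add_one]
        simp [List.getElem?_eq_getElem h]
      rw [h1, List.drop_eq_getElem_cons h, zmB_fst_cons, if_neg h0,
        List.append_assoc, List.singleton_append]
  · rw [zmOuter.eq_def, dif_neg h]
    rw [List.drop_eq_nil_of_le (by omega), List.take_of_length_le (by omega)]
    simp [zmB]
termination_by nums.length - x
decreasing_by
  · simp only [List.length_set]; omega
  · omega

-- ===== VERDICT (by name: the statement is the Claim_ definition above) =====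
theorem zero_max_spec : Claim_equal_zero_max := by
  intro nums _
  unfold Spec_zero_max zero_max zero_max_alt
  rw [zmOuter_eq]
  simp
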